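-- pv_equiv track=rewrite | github.com/HericPan/ICS33-Records | ICS 33 Official/Quiz 1/3-4/q4b_ref.py | by_skill
-- ===== SOURCE A (Python) =====
-- def by_skill(db1 : {str: {str: int}}) -> [(int, [(str, [str])])]:
--     record = dict()
--     for name in db1:
--         for skill,level in db1[name].items():
--             if level not in record:
--                 record[level] = dict()
--             if skill not in record[level]:
--                 record[level][skill] = list()
--             record[level][skill].append(name)
--
--     return sorted([(l,\
--                     sorted([(s,sorted(record[l][s])) for s in record[l]])) for l in record], \
--                     reverse=True)
-- ===== SOURCE B (Python) =====
-- def by_skill(db1):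
--     # Flatten to (level, skill, name) triples, then build the nested result
--     # directly with sorted set/list comprehensions -- no intermediate dicts.
--     triples = [(level, skill, name)
--                for name, skills in db1.items()
--                for skill, level in skills.items()]
--
--     def level_entry(l):
--         group = [t for t in triples if t[0] == l]
--         return (l, [(s, sorted([n for _, s2, n in group if s2 == s]))
--                     for s in sorted({s2 for _, s2, _ in group})])
--
--     return [level_entry(l) for l in sorted({l for l, _, _ in triples}, reverse=True)]
-- ===== Notes on version B (the rewrite author's own statement) =====
-- stated objective: simpler
-- what changed: A builds a nested level->skill->names dict with membership guards and then sorts each layer; B flattens the db to (level,skill,name) triples once and builds the result directly with sorted set/list comprehensions (no intermediate dicts, no guards).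
import Mathlib
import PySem

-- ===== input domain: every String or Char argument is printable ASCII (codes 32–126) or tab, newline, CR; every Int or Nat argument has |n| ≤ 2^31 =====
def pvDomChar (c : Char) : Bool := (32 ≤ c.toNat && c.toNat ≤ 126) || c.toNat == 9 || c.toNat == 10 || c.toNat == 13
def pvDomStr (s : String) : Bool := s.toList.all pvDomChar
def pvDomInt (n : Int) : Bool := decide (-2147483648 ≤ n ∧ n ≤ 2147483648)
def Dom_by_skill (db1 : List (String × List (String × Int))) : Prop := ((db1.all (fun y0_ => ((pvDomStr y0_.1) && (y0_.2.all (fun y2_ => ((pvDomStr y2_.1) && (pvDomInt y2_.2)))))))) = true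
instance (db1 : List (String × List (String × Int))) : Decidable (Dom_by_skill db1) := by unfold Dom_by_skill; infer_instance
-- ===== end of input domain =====

-- B regroups via one flat triple list and sorted set comprehensions instead of A's nested dict building
-- (objective: simpler/alternative decomposition; not claimed faster). Equivalence is about the return value.

-- ===== PORT A =====
-- dict keys are distinct, so Python's tuple comparisons in A's sorts never reach the second
-- component; sorting by the first component is exact here.
def by_skill (db1 : List (String × List (String × Int))) : List (Int × (List (String × List String))) :=
  let db : PySem.Dict String (List (String × Int)) := PySem.Dict.ofList db1
  let record : PySem.Dict Int (PySem.Dict String (List String)) :=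
    db.items.foldl (fun record p =>
      (PySem.Dict.ofList p.2).items.foldl (fun record q =>
        let level := q.2
        let skill := q.1
        let record := if record.contains level then record else record.insert level PySem.Dict.empty
        let inner := record.getD level PySem.Dict.empty
        let inner := if inner.contains skill then inner else inner.insert skill []
        let inner := inner.insert skill (inner.getD skill [] ++ [p.1])
        record.insert level inner) record) PySem.Dict.empty
  PySem.List.sorted (record.items.map (fun r =>
      (r.1, PySem.List.sorted (r.2.items.map (fun q => (q.1, PySem.List.sorted q.2 (fun x => x))))
              (fun x => x.1))))
    (fun x => x.1) true

-- ===== PORT B =====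
def by_skill_alt (db1 : List (String × List (String × Int))) : List (Int × (List (String × List String))) :=
  let triples : List (Int × String × String) :=
    (PySem.Dict.ofList db1).items.flatMap (fun p =>
      (PySem.Dict.ofList p.2).items.map (fun q => (q.2, q.1, p.1)))
  (PySem.List.sorted (PySem.Set.ofList (triples.map (fun t => t.1))) (fun x => x) true).map (fun l =>
    let group := triples.filter (fun t => t.1 == l)
    (l, (PySem.List.sorted (PySem.Set.ofList (group.map (fun t => t.2.1))) (fun x => x)).map (fun s =>
      (s, PySem.List.sorted ((group.filter (fun t => t.2.1 == s)).map (fun t => t.2.2)) (fun x => x)))))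

-- ===== PRECONDITION & SPEC =====
def Spec_by_skill (db1 : List (String × List (String × Int))) (out : List (Int × (List (String × List String)))) : Prop := out = by_skill_alt db1
instance (db1 : List (String × List (String × Int))) (out : List (Int × (List (String × List String)))) : Decidable (Spec_by_skill db1 out) := by unfold Spec_by_skill; infer_instance

-- ===== CLAIM (what is proved, stated in full; the proofs are below) =====
def Claim_equal_by_skill : Prop := ∀ (db1 : List (String × List (String × Int))), Dom_by_skill db1 → Spec_by_skill db1 (by_skill db1)

-- ===== LEMMAS AND PROOFS =====

-- the body of A's inner loop, as a step over a (level, skill, name) triple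
def pvRecord (r : PySem.Dict Int (PySem.Dict String (List String))) (t : Int × String × String) :
    PySem.Dict Int (PySem.Dict String (List String)) :=
  if r.contains t.1 then r else r.insert t.1 PySem.Dict.empty

def pvInner0 (r : PySem.Dict Int (PySem.Dict String (List String))) (t : Int × String × String) :
    PySem.Dict String (List String) :=
  (pvRecord r t).getD t.1 PySem.Dict.empty

def pvInner1 (r : PySem.Dict Int (PySem.Dict String (List String))) (t : Int × String × String) :
    PySem.Dict String (List String) :=
  if (pvInner0 r t).contains t.2.1 then pvInner0 r t else (pvInner0 r t).insert t.2.1 []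

def pvStep (r : PySem.Dict Int (PySem.Dict String (List String))) (t : Int × String × String) :
    PySem.Dict Int (PySem.Dict String (List String)) :=
  (pvRecord r t).insert t.1 ((pvInner1 r t).insert t.2.1 ((pvInner1 r t).getD t.2.1 [] ++ [t.2.2]))


lemma pvInner0_eq (r : PySem.Dict Int (PySem.Dict String (List String))) (t : Int × String × String) :
    pvInner0 r t = r.getD t.1 PySem.Dict.empty := by
  unfold pvInner0 pvRecord
  split_ifs with hc
  · rfl
  · rw [PySem.Dict.getD_insert_self, PySem.Dict.getD_of_not_contains r _ (by simpa using hc)]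

lemma pvRecord_getD_of_ne (r : PySem.Dict Int (PySem.Dict String (List String))) (t : Int × String × String)
    {l : Int} (h : l ≠ t.1) : (pvRecord r t).getD l PySem.Dict.empty = r.getD l PySem.Dict.empty := by
  unfold pvRecord
  split_ifs with hc
  · rfl
  · rw [PySem.Dict.getD_insert_of_ne _ _ _ h]

lemma pvInner1_getD_self (r : PySem.Dict Int (PySem.Dict String (List String))) (t : Int × String × String) :
    (pvInner1 r t).getD t.2.1 [] = (pvInner0 r t).getD t.2.1 [] := by
  unfold pvInner1
  split_ifs with hc
  · rfl
  · rw [PySem.Dict.getD_insert_self, PySem.Dict.getD_of_not_contains _ _ (by simpa using hc)]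

lemma pvInner1_getD_of_ne (r : PySem.Dict Int (PySem.Dict String (List String))) (t : Int × String × String)
    {s : String} (h : s ≠ t.2.1) : (pvInner1 r t).getD s [] = (pvInner0 r t).getD s [] := by
  unfold pvInner1
  split_ifs with hc
  · rfl
  · rw [PySem.Dict.getD_insert_of_ne _ _ _ h]

lemma pvInner1_contains (r : PySem.Dict Int (PySem.Dict String (List String))) (t : Int × String × String)
    (s : String) : ((pvInner1 r t).contains s = true) ↔ (s = t.2.1 ∨ (pvInner0 r t).contains s = true) := by
  unfold pvInner1
  split_ifs with hc
  · constructor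
    · exact fun h => Or.inr h
    · rintro (rfl | h)
      · exact hc
      · exact h
  · simp [PySem.Dict.contains_insert]

lemma pvRecord_contains (r : PySem.Dict Int (PySem.Dict String (List String))) (t : Int × String × String)
    (l : Int) : ((pvRecord r t).contains l = true) ↔ (l = t.1 ∨ r.contains l = true) := by
  unfold pvRecord
  split_ifs with hc
  · constructor
    · exact fun h => Or.inr h
    · rintro (rfl | h)
      · exact hc
      · exact h
  · simp [PySem.Dict.contains_insert]

-- the flat (level, skill, name) triple list both programs traverse
def pvFlat (db1 : List (String × List (String × Int))) : List (Int × String × String) :=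
  (PySem.Dict.ofList db1).items.flatMap (fun p =>
    (PySem.Dict.ofList p.2).items.map (fun q => (q.2, q.1, p.1)))

-- names of a (level, skill) group, in traversal order
def pvNames (ts : List (Int × String × String)) (l : Int) (s : String) : List String :=
  (ts.filter (fun t => t.1 == l && t.2.1 == s)).map (fun t => t.2.2)

lemma by_skill_eq_foldl (db1 : List (String × List (String × Int))) :
    by_skill db1 = PySem.List.sorted (((pvFlat db1).foldl pvStep PySem.Dict.empty).items.map (fun r =>
      (r.1, PySem.List.sorted (r.2.items.map (fun q => (q.1, PySem.List.sorted q.2 (fun x => x))))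
              (fun x => x.1)))) (fun x => x.1) true := by
  simp only [by_skill, pvFlat, pvStep, pvRecord, pvInner0, pvInner1, List.foldl_flatMap, List.foldl_map]

lemma pvStep_lookup (r : PySem.Dict Int (PySem.Dict String (List String))) (t : Int × String × String)
    (l : Int) (s : String) :
    (((pvStep r t).getD l PySem.Dict.empty).getD s []) =
      ((r.getD l PySem.Dict.empty).getD s []) ++ (if t.1 = l ∧ t.2.1 = s then [t.2.2] else []) := by
  unfold pvStep
  by_cases hl : l = t.1
  · subst hl
    rw [PySem.Dict.getD_insert_self]
    by_cases hs : s = t.2.1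
    · subst hs
      rw [PySem.Dict.getD_insert_self, pvInner1_getD_self, pvInner0_eq]
      simp
    · rw [PySem.Dict.getD_insert_of_ne _ _ _ hs, pvInner1_getD_of_ne r t hs, pvInner0_eq]
      simp [Ne.symm hs]
  · rw [PySem.Dict.getD_insert_of_ne _ _ _ hl, pvRecord_getD_of_ne r t hl]
    simp [Ne.symm hl]
lemma pvStep_contains (r : PySem.Dict Int (PySem.Dict String (List String))) (t : Int × String × String)
    (l : Int) : ((pvStep r t).contains l = true) ↔ (r.contains l = true ∨ t.1 = l) := by
  unfold pvStep
  rw [show ((pvRecord r t).insert t.1 ((pvInner1 r t).insert t.2.1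
        ((pvInner1 r t).getD t.2.1 [] ++ [t.2.2]))).contains l =
      (l == t.1 || (pvRecord r t).contains l) from PySem.Dict.contains_insert _ _ _ _]
  simp only [Bool.or_eq_true, beq_iff_eq, pvRecord_contains]
  tauto
lemma pvStep_inner_contains (r : PySem.Dict Int (PySem.Dict String (List String))) (t : Int × String × String)
    (l : Int) (s : String) :
    (((pvStep r t).getD l PySem.Dict.empty).contains s = true) ↔
      ((r.getD l PySem.Dict.empty).contains s = true ∨ (t.1 = l ∧ t.2.1 = s)) := by
  unfold pvStep
  by_cases hl : l = t.1
  · subst hl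
    rw [PySem.Dict.getD_insert_self]
    simp only [PySem.Dict.contains_insert, Bool.or_eq_true, beq_iff_eq, pvInner1_contains,
      pvInner0_eq]
    tauto
  · rw [PySem.Dict.getD_insert_of_ne _ _ _ hl, pvRecord_getD_of_ne r t hl]
    have : ¬ (t.1 = l ∧ t.2.1 = s) := fun h => hl h.1.symm
    tauto
lemma pvStep_nodup (r : PySem.Dict Int (PySem.Dict String (List String))) (t : Int × String × String)
    (h : r.keys.Nodup) : (pvStep r t).keys.Nodup := by
  unfold pvStep
  apply PySem.Dict.nodup_keys_insert
  unfold pvRecord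
  split_ifs with hc
  · exact h
  · exact PySem.Dict.nodup_keys_insert _ _ _ h
lemma pvStep_inner_nodup (r : PySem.Dict Int (PySem.Dict String (List String))) (t : Int × String × String)
    (h : ∀ l, (r.getD l PySem.Dict.empty).keys.Nodup) (l : Int) :
    ((pvStep r t).getD l PySem.Dict.empty).keys.Nodup := by
  have h1 : (pvInner1 r t).keys.Nodup := by
    unfold pvInner1
    have h0 : (pvInner0 r t).keys.Nodup := by rw [pvInner0_eq]; exact h t.1
    split_ifs with hc
    · exact h0
    · exact PySem.Dict.nodup_keys_insert _ _ _ h0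
  unfold pvStep
  by_cases hl : l = t.1
  · subst hl
    rw [PySem.Dict.getD_insert_self]
    exact PySem.Dict.nodup_keys_insert _ _ _ h1
  · rw [PySem.Dict.getD_insert_of_ne _ _ _ hl, pvRecord_getD_of_ne r t hl]
    exact h l
lemma pvFoldl_lookup (ts : List (Int × String × String)) (r : PySem.Dict Int (PySem.Dict String (List String)))
    (l : Int) (s : String) :
    (((ts.foldl pvStep r).getD l PySem.Dict.empty).getD s []) =
      ((r.getD l PySem.Dict.empty).getD s []) ++ pvNames ts l s := by
  induction ts generalizing r with
  | nil => simp [pvNames]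
  | cons t ts ih =>
    rw [List.foldl_cons, ih, pvStep_lookup]
    simp only [pvNames, List.filter_cons, List.append_assoc]
    by_cases h : t.1 = l ∧ t.2.1 = s
    · simp [h.1, h.2]
    · have hb : ¬((t.1 == l && t.2.1 == s) = true) := by simpa using h
      simp [h, hb]
lemma pvFoldl_contains (ts : List (Int × String × String)) (r : PySem.Dict Int (PySem.Dict String (List String)))
    (l : Int) :
    ((ts.foldl pvStep r).contains l = true) ↔ (r.contains l = true ∨ ∃ t ∈ ts, t.1 = l) := by
  induction ts generalizing r with
  | nil => simp
  | cons t ts ih =>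
    rw [List.foldl_cons, ih, pvStep_contains]
    simp only [List.mem_cons]
    aesop
lemma pvFoldl_inner_contains (ts : List (Int × String × String)) (r : PySem.Dict Int (PySem.Dict String (List String)))
    (l : Int) (s : String) :
    (((ts.foldl pvStep r).getD l PySem.Dict.empty).contains s = true) ↔
      ((r.getD l PySem.Dict.empty).contains s = true ∨ ∃ t ∈ ts, t.1 = l ∧ t.2.1 = s) := by
  induction ts generalizing r with
  | nil => simp
  | cons t ts ih =>
    rw [List.foldl_cons, ih, pvStep_inner_contains]
    simp only [List.mem_cons]
    aesop
lemma pvFoldl_nodup (ts : List (Int × String × String)) (r : PySem.Dict Int (PySem.Dict String (List String)))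
    (h : r.keys.Nodup) : (ts.foldl pvStep r).keys.Nodup := by
  induction ts generalizing r with
  | nil => exact h
  | cons t ts ih => exact ih _ (pvStep_nodup r t h)
lemma pvFoldl_inner_nodup (ts : List (Int × String × String)) (r : PySem.Dict Int (PySem.Dict String (List String)))
    (h : ∀ l, (r.getD l PySem.Dict.empty).keys.Nodup) (l : Int) :
    ((ts.foldl pvStep r).getD l PySem.Dict.empty).keys.Nodup := by
  induction ts generalizing r l with
  | nil => exact h l
  | cons t ts ih => exact ih _ (fun l' => pvStep_inner_nodup r t h l') l
lemma pvNames_eq_filter_filter (ts : List (Int × String × String)) (l : Int) (s : String) :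
    ((ts.filter (fun t => t.1 == l)).filter (fun t => t.2.1 == s)).map (fun t => t.2.2)
      = pvNames ts l s := by
  unfold pvNames
  rw [List.filter_filter]
  congr 1
  apply List.filter_congr
  intro t _
  rw [Bool.and_comm]

lemma by_skill_alt_eq (db1 : List (String × List (String × Int))) :
    by_skill_alt db1 =
      (PySem.List.sorted (PySem.Set.ofList ((pvFlat db1).map (fun t => t.1))) (fun x => x) true).map (fun l =>
        (l, (PySem.List.sorted (PySem.Set.ofList (((pvFlat db1).filter (fun t => t.1 == l)).map (fun t => t.2.1))) (fun x => x)).map (fun s =>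
          (s, PySem.List.sorted (pvNames (pvFlat db1) l s) (fun x => x))))) := by
  simp only [by_skill_alt, pvFlat, pvNames_eq_filter_filter]

lemma pv_empty_inner_nodup : ∀ l : Int,
    ((PySem.Dict.empty : PySem.Dict Int (PySem.Dict String (List String))).getD l PySem.Dict.empty).keys.Nodup := by
  intro l
  rw [PySem.Dict.getD_empty]
  exact PySem.Dict.nodup_keys_empty

lemma pv_inner_eq (db1 : List (String × List (String × Int))) (l : Int) :
    PySem.List.sorted ((((pvFlat db1).foldl pvStep PySem.Dict.empty).getD l PySem.Dict.empty).items.map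
        (fun q => (q.1, PySem.List.sorted q.2 (fun x => x)))) (fun x => x.1)
      = (PySem.List.sorted (PySem.Set.ofList (((pvFlat db1).filter (fun t => t.1 == l)).map (fun t => t.2.1))) (fun x => x)).map
          (fun s => (s, PySem.List.sorted (pvNames (pvFlat db1) l s) (fun x => x))) := by
  have hnd : (((pvFlat db1).foldl pvStep PySem.Dict.empty).getD l PySem.Dict.empty).keys.Nodup :=
    pvFoldl_inner_nodup _ _ pv_empty_inner_nodup l
  have hsknd : (PySem.List.sorted (PySem.Set.ofList (((pvFlat db1).filter (fun t => t.1 == l)).map (fun t => t.2.1))) (fun x => x)).Nodup :=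
    (PySem.List.sorted_perm _ _ _).symm.nodup (PySem.Set.nodup_ofList _)
  apply PySem.List.sorted_eq_of_perm_of_pairwise_lt
  · -- the right-hand side is a permutation of the mapped items
    rw [PySem.Dict.items_eq_map_keys _ hnd ([] : List String), List.map_map]
    have hval : ∀ s : String,
        ((fun q => (q.1, PySem.List.sorted q.2 (fun x => x))) ∘
          (fun k => (k, (((pvFlat db1).foldl pvStep PySem.Dict.empty).getD l PySem.Dict.empty).getD k []))) s
          = (s, PySem.List.sorted (pvNames (pvFlat db1) l s) (fun x => x)) := by
      intro s
      have := pvFoldl_lookup (pvFlat db1) PySem.Dict.empty l s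
      simp only [PySem.Dict.getD_empty, List.nil_append] at this
      simp [this]
    rw [List.map_congr_left (fun s _ => hval s)]
    apply List.Perm.map
    rw [List.perm_ext_iff_of_nodup hsknd hnd]
    intro s
    rw [← PySem.Dict.contains_iff_mem_keys, pvFoldl_inner_contains,
      PySem.List.mem_sorted, PySem.Set.mem_ofList]
    simp [PySem.Dict.getD_empty, PySem.Dict.contains_empty, List.mem_filter]
  · -- and it is strictly increasing in the skill component
    rw [List.pairwise_map]
    exact PySem.List.sorted_ofList_pairwise_lt _

lemma pv_levels_pairwise (db1 : List (String × List (String × Int))) :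
    (PySem.List.sorted (PySem.Set.ofList ((pvFlat db1).map (fun t => t.1))) (fun x => x) true).Pairwise
      (fun a b => b < a) := by
  have h1 := PySem.List.sorted_pairwise_rev (PySem.Set.ofList ((pvFlat db1).map (fun t => t.1))) (fun x => x)
  have h2 : (PySem.List.sorted (PySem.Set.ofList ((pvFlat db1).map (fun t => t.1))) (fun x => x) true).Nodup :=
    (PySem.List.sorted_perm _ _ _).symm.nodup (PySem.Set.nodup_ofList _)
  exact (h1.and h2).imp (fun h => lt_of_le_of_ne h.1 (Ne.symm h.2))

-- ===== VERDICT (by name: the statement is the Claim_ definition above) =====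
theorem by_skill_spec : Claim_equal_by_skill := by
  intro db1 _
  unfold Spec_by_skill
  rw [by_skill_eq_foldl, by_skill_alt_eq]
  have hnd : ((pvFlat db1).foldl pvStep PySem.Dict.empty).keys.Nodup :=
    pvFoldl_nodup _ _ PySem.Dict.nodup_keys_empty
  have hlvnd : (PySem.List.sorted (PySem.Set.ofList ((pvFlat db1).map (fun t => t.1))) (fun x => x) true).Nodup :=
    (PySem.List.sorted_perm _ _ _).symm.nodup (PySem.Set.nodup_ofList _)
  apply PySem.List.sorted_rev_eq_of_perm_of_pairwise_gt
  · rw [PySem.Dict.items_eq_map_keys _ hnd PySem.Dict.empty, List.map_map]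
    have hval : ∀ l : Int,
        ((fun r => (r.1, PySem.List.sorted (r.2.items.map (fun q => (q.1, PySem.List.sorted q.2 (fun x => x)))) (fun x => x.1))) ∘
          (fun k => (k, ((pvFlat db1).foldl pvStep PySem.Dict.empty).getD k PySem.Dict.empty))) l
          = (l, (PySem.List.sorted (PySem.Set.ofList (((pvFlat db1).filter (fun t => t.1 == l)).map (fun t => t.2.1))) (fun x => x)).map
              (fun s => (s, PySem.List.sorted (pvNames (pvFlat db1) l s) (fun x => x)))) := by
      intro l
      simp only [Function.comp_apply]
      rw [pv_inner_eq]
    rw [List.map_congr_left (fun l _ => hval l)]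
    apply List.Perm.map
    rw [List.perm_ext_iff_of_nodup hlvnd hnd]
    intro l
    rw [← PySem.Dict.contains_iff_mem_keys, pvFoldl_contains,
      PySem.List.mem_sorted, PySem.Set.mem_ofList]
    simp [PySem.Dict.contains_empty]
  · rw [List.pairwise_map]
    exact pv_levels_pairwise db1
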